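-- pv_equiv track=rewrite | github.com/AbdulsemedA/Competitive-Programming | masha_and_beautiful_tree.py | checker_sort
-- ===== SOURCE A (Python) =====
-- def checker(a1, a2):
--     if a1[0] > a2[-1]:
--         return a2 + a1, 1
--     return a1 + a2, 0
--
-- def checker_sort(arr):
--     if len(arr) == 1:
--         return arr, 0
--     mid = len(arr) // 2
--     left, step1 = checker_sort(arr[:mid])
--     right, step2 = checker_sort(arr[mid:])
--     ans, step3 = checker(left, right)
--     return ans, step1 + step2 + step3
-- ===== SOURCE B (Python) =====
-- def checker_sort(arr):
--     # Two-phase O(n): phase 1 tracks only (first, last, swap-count) per segment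
--     # and records each swap decision in a dict; phase 2 emits the output once
--     # into a flat list following the recorded decisions (no slicing/concatenation).
--     if len(arr) == 1:
--         return arr, 0
--     swaps = {}
--
--     def plan(i, j):
--         if j - i == 1:
--             x = arr[i]
--             return x, x, 0
--         m = (i + j) // 2
--         lf, ll, c1 = plan(i, m)
--         rf, rl, c2 = plan(m, j)
--         s = lf > rl
--         swaps[(i, j)] = s
--         if s:
--             return rf, ll, c1 + c2 + 1
--         return lf, rl, c1 + c2
--
--     _, _, cnt = plan(0, len(arr))
--     out = []
--
--     def build(i, j):
--         if j - i == 1: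
--             out.append(arr[i])
--             return
--         m = (i + j) // 2
--         if swaps[(i, j)]:
--             build(m, j)
--             build(i, m)
--         else:
--             build(i, m)
--             build(m, j)
--
--     build(0, len(arr))
--     return out, cnt
-- ===== Notes on version B (the rewrite author's own statement) =====
-- stated objective: alternative
-- what changed: Replaces the slice-and-concatenate recursion by two index-based passes: a planning pass that tracks only (first, last, swap-count) per segment and records each swap decision in a dict, and a build pass that emits the output once into a flat list, so no intermediate lists are ever sliced or concatenated.
-- outside the precondition, e.g. on checker_sort([]): A raises RecursionError, B raises RecursionError
import Mathlib
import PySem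

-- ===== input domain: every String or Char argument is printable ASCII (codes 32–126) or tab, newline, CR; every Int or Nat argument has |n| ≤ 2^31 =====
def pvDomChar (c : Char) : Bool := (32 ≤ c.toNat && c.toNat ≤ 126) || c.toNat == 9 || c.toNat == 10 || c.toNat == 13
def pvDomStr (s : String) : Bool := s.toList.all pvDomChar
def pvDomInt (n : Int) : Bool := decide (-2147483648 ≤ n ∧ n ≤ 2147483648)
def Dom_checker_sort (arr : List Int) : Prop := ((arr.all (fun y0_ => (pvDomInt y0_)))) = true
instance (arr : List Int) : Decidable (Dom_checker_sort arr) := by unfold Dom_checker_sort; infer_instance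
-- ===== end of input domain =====

-- B replaces A's slice-and-concatenate recursion by two index-based passes: plan records per-segment
-- (first, last, swap-count) and the swap decisions in a dict, build emits the output once (objective: alternative).

-- ===== PORT A =====
-- a1[0] / a2[-1]: every list checker receives inside checker_sort (on Pre_) is nonempty, so headD/getLastD are exact
def checker (a1 a2 : List Int) : List Int × Int :=
  if a1.headD 0 > a2.getLastD 0 then (a2 ++ a1, 1) else (a1 ++ a2, 0)

-- structural recursion on a fuel counter (= arr.length suffices: each half is strictly shorter);
-- fuel is only a totality guard, the branch structure is A's
def csAgo : Nat → List Int → List Int × Int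
  | 0, _ => ([], 0)  -- fuel exhausted: unreachable when fuel ≥ arr.length ≥ 1
  | k + 1, arr =>
    if arr.length = 1 then (arr, 0)
    else if arr.length ≤ 1 then ([], 0)  -- totality guard: Python recurses forever on [] (outside Pre_)
    else
      let mid := arr.length / 2
      let L := csAgo k (arr.take mid)   -- arr[:mid], exact since 0 ≤ mid ≤ len
      let R := csAgo k (arr.drop mid)   -- arr[mid:]
      let M := checker L.1 R.1
      (M.1, L.2 + R.2 + M.2)

def checker_sort (arr : List Int) : List Int × Int := csAgo arr.length arr

-- ===== PORT B =====
-- plan(i, j): (first, last, swap-count) of segment arr[i:j]; records each swap decision in the dict.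
-- Structural recursion on fuel (= j - i suffices); fuel is only a totality guard.
def planBgo (arr : List Int) : Nat → Nat → Nat → PySem.Dict (Nat × Nat) Bool →
    Int × Int × Int × PySem.Dict (Nat × Nat) Bool
  | 0, _, _, d => (0, 0, 0, d)  -- fuel exhausted: unreachable when fuel ≥ j - i ≥ 1
  | k + 1, i, j, d =>
    if j - i = 1 then
      let x := arr.getD i 0   -- arr[i]; 0 ≤ i < len in every reachable call
      (x, x, 0, d)
    else if j ≤ i + 1 then (0, 0, 0, d)  -- totality guard: Python recurses forever here (outside Pre_)
    else
      let m := (i + j) / 2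
      let L := planBgo arr k i m d
      let R := planBgo arr k m j L.2.2.2
      let s : Bool := decide (L.1 > R.2.1)
      let d3 := R.2.2.2.insert (i, j) s
      if s then (R.1, L.2.1, L.2.2.1 + R.2.2.1 + 1, d3)
      else (L.1, R.2.1, L.2.2.1 + R.2.2.1, d3)

-- build(i, j): appends segment arr[i:j], rearranged per the recorded decisions, to out
def buildBgo (arr : List Int) (d : PySem.Dict (Nat × Nat) Bool) : Nat → Nat → Nat → List Int → List Int
  | 0, _, _, out => out  -- fuel exhausted: unreachable when fuel ≥ j - i ≥ 1
  | k + 1, i, j, out =>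
    if j - i = 1 then out ++ [arr.getD i 0]
    else if j ≤ i + 1 then out  -- totality guard (unreachable on Pre_)
    else
      let m := (i + j) / 2
      if d.getD (i, j) false then buildBgo arr d k i m (buildBgo arr d k m j out)
      else buildBgo arr d k m j (buildBgo arr d k i m out)

def checker_sort_alt (arr : List Int) : List Int × Int :=
  if arr.length = 1 then (arr, 0)
  else
    let p := planBgo arr arr.length 0 arr.length PySem.Dict.empty
    (buildBgo arr p.2.2.2 arr.length 0 arr.length [], p.2.2.1)


-- ===== PRECONDITION & SPEC =====
-- Pre_ excludes only arr = [], on which the Python A (and B) recurse without a base case (RecursionError).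
def Pre_checker_sort (arr : List Int) : Prop := arr ≠ []
instance (arr : List Int) : Decidable (Pre_checker_sort arr) := by unfold Pre_checker_sort; infer_instance
def pvWitness_checker_sort : List Int := ([3, 1, 2])

def Spec_checker_sort (arr : List Int) (out : List Int × Int) : Prop := out = checker_sort_alt arr
instance (arr : List Int) (out : List Int × Int) : Decidable (Spec_checker_sort arr out) := by unfold Spec_checker_sort; infer_instance

-- ===== CLAIM (what is proved, stated in full; the proofs are below) =====
def Claim_equal_checker_sort : Prop := ∀ (arr : List Int), Dom_checker_sort arr → Pre_checker_sort arr → Spec_checker_sort arr (checker_sort arr)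

-- ===== LEMMAS AND PROOFS =====

-- fuel insensitivity of A's recursion: any fuel ≥ length computes the same value
theorem csAgo_insens : ∀ (k k' : Nat) (l : List Int), l.length ≤ k → l.length ≤ k' →
    csAgo k l = csAgo k' l := by
  intro k
  induction k with
  | zero =>
    intro k' l hk hk'
    have h0 : l.length = 0 := Nat.le_zero.mp hk
    cases k' with
    | zero => rfl
    | succ k' => simp [csAgo, h0]
  | succ k ih =>
    intro k' l hk hk'
    cases k' with
    | zero =>
      have h0 : l.length = 0 := Nat.le_zero.mp hk'
      simp [csAgo, h0]
    | succ k' =>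
      simp only [csAgo]
      by_cases h1 : l.length = 1
      · simp [h1]
      · by_cases h2 : l.length ≤ 1
        · simp [h1, h2]
        · simp only [if_neg h1, if_neg h2]
          have e1 := ih k' (l.take (l.length / 2))
            (by simp [List.length_take]; omega) (by simp [List.length_take]; omega)
          have e2 := ih k' (l.drop (l.length / 2))
            (by simp [List.length_drop]; omega) (by simp [List.length_drop]; omega)
          rw [e1, e2]

theorem cs_length_aux (k : Nat) : ∀ (l : List Int), l.length ≤ k → (csAgo k l).1.length = l.length := by
  induction k with
  | zero =>
    intro l hl
    have : l.length = 0 := Nat.le_zero.mp hl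
    simp [csAgo, this]
  | succ k ih =>
    intro l hl
    simp only [csAgo]
    by_cases h1 : l.length = 1
    · simp [h1]
    · by_cases h2 : l.length ≤ 1
      · simp [h1, h2]; omega
      · simp only [if_neg h1, if_neg h2, checker]
        have e1 := ih (l.take (l.length / 2)) (by simp [List.length_take]; omega)
        have e2 := ih (l.drop (l.length / 2)) (by simp [List.length_drop]; omega)
        split_ifs <;>
          simp only [List.length_append, e1, e2, List.length_take, List.length_drop] <;> omega

theorem cs_length (l : List Int) : (checker_sort l).1.length = l.length :=
  cs_length_aux l.length l le_rfl

theorem headD_append {a b : List Int} (h : a ≠ []) : (a ++ b).headD 0 = a.headD 0 := by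
  cases a with
  | nil => exact absurd rfl h
  | cons x xs => simp

theorem getLastD_append {a b : List Int} (h : b ≠ []) : (a ++ b).getLastD 0 = b.getLastD 0 := by
  cases hb : b.getLast? with
  | none => exact absurd (List.getLast?_eq_none_iff.mp hb) h
  | some y => simp [List.getLastD_eq_getLast?, List.getLast?_append, hb]

theorem sub_single (arr : List Int) (i : Nat) (h : i < arr.length) :
    (arr.drop i).take 1 = [arr.getD i 0] := by
  simp only [List.getD_eq_getElem?_getD, List.getElem?_eq_getElem h, Option.getD_some]
  rw [List.drop_eq_getElem_cons h, List.take_succ_cons, List.take_zero]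

theorem sub_split_take (arr : List Int) (i j m : Nat) (hm : m = (i + j) / 2) (h : i + 2 ≤ j) :
    ((arr.drop i).take (j - i)).take ((j - i) / 2) = (arr.drop i).take (m - i) := by
  rw [List.take_take]
  congr 1
  omega

theorem sub_split_drop (arr : List Int) (i j m : Nat) (hm : m = (i + j) / 2) (h : i + 2 ≤ j) :
    ((arr.drop i).take (j - i)).drop ((j - i) / 2) = (arr.drop m).take (j - m) := by
  rw [List.drop_take, List.drop_drop]
  have e1 : i + (j - i) / 2 = m := by omega
  have e2 : j - i - (j - i) / 2 = j - m := by omega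
  rw [e1, e2]

theorem cs_unfold (l : List Int) (h2 : 2 ≤ l.length) :
    checker_sort l =
      ((checker (checker_sort (l.take (l.length / 2))).1 (checker_sort (l.drop (l.length / 2))).1).1,
       (checker_sort (l.take (l.length / 2))).2 + (checker_sort (l.drop (l.length / 2))).2 +
       (checker (checker_sort (l.take (l.length / 2))).1 (checker_sort (l.drop (l.length / 2))).1).2) := by
  unfold checker_sort
  obtain ⟨t, ht⟩ : ∃ t, l.length = t + 1 := ⟨l.length - 1, by omega⟩
  conv_lhs => rw [ht]
  simp only [csAgo]
  rw [if_neg (by omega), if_neg (by omega)]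
  rw [csAgo_insens t (l.take (l.length / 2)).length (l.take (l.length / 2))
        (by simp [List.length_take]; omega) le_rfl,
      csAgo_insens t (l.drop (l.length / 2)).length (l.drop (l.length / 2))
        (by simp [List.length_drop]; omega) le_rfl]

theorem plan_build (k : Nat) : ∀ (arr : List Int) (i j : Nat) (d : PySem.Dict (Nat × Nat) Bool),
    j - i ≤ k → i < j → j ≤ arr.length →
    (planBgo arr k i j d).1 = (checker_sort ((arr.drop i).take (j - i))).1.headD 0 ∧
    (planBgo arr k i j d).2.1 = (checker_sort ((arr.drop i).take (j - i))).1.getLastD 0 ∧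
    (planBgo arr k i j d).2.2.1 = (checker_sort ((arr.drop i).take (j - i))).2 ∧
    (∀ p : Nat × Nat, ¬ (i ≤ p.1 ∧ p.2 ≤ j ∧ p.1 < p.2) → (planBgo arr k i j d).2.2.2.getD p false = d.getD p false) ∧
    (∀ (dd : PySem.Dict (Nat × Nat) Bool) (out : List Int),
       (∀ p : Nat × Nat, i ≤ p.1 → p.2 ≤ j → p.1 < p.2 → dd.getD p false = (planBgo arr k i j d).2.2.2.getD p false) →
       buildBgo arr dd k i j out = out ++ (checker_sort ((arr.drop i).take (j - i))).1) := by
  induction k with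
  | zero => intro arr i j d hk hij hj; omega
  | succ k ih =>
    intro arr i j d hk hij hj
    by_cases h1 : j - i = 1
    · have hi : i < arr.length := by omega
      have hseg : (arr.drop i).take (j - i) = [arr.getD i 0] := by
        rw [h1]; exact sub_single arr i hi
      have hcs : checker_sort [arr.getD i 0] = ([arr.getD i 0], 0) := by
        simp [checker_sort, csAgo]
      rw [hseg, hcs]
      simp only [planBgo, if_pos h1]
      refine ⟨rfl, rfl, trivial, fun p _ => trivial, ?_⟩
      intro dd out _
      simp only [buildBgo]
      simp [h1]
    · have h2 : i + 2 ≤ j := by omega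
      have hle : ¬ j ≤ i + 1 := by omega
      set m := (i + j) / 2 with hm
      have hmi : i < m := by omega
      have hmj : m < j := by omega
      have hlen : ((arr.drop i).take (j - i)).length = j - i := by
        simp [List.length_take, List.length_drop]; omega
      have hcs : checker_sort ((arr.drop i).take (j - i)) =
          ((checker (checker_sort ((arr.drop i).take (m - i))).1
                    (checker_sort ((arr.drop m).take (j - m))).1).1,
           (checker_sort ((arr.drop i).take (m - i))).2 +
           (checker_sort ((arr.drop m).take (j - m))).2 +
           (checker (checker_sort ((arr.drop i).take (m - i))).1
                    (checker_sort ((arr.drop m).take (j - m))).1).2) := by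
        rw [cs_unfold _ (by omega)]
        rw [hlen]
        rw [sub_split_take arr i j m hm h2, sub_split_drop arr i j m hm h2]
      have hLlen := cs_length ((arr.drop i).take (m - i))
      have hRlen := cs_length ((arr.drop m).take (j - m))
      have hLne : (checker_sort ((arr.drop i).take (m - i))).1 ≠ [] := by
        intro hnil; rw [hnil] at hLlen
        simp [List.length_take, List.length_drop] at hLlen; omega
      have hRne : (checker_sort ((arr.drop m).take (j - m))).1 ≠ [] := by
        intro hnil; rw [hnil] at hRlen
        simp [List.length_take, List.length_drop] at hRlen; omega
      obtain ⟨L1, L2, L3, L4, L5⟩ := ih arr i m d (by omega) hmi (by omega)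
      obtain ⟨R1, R2, R3, R4, R5⟩ := ih arr m j (planBgo arr k i m d).2.2.2 (by omega) hmj hj
      have hpl : planBgo arr (k + 1) i j d =
          (let P := planBgo arr k i m d;
           let Q := planBgo arr k m j P.2.2.2;
           let s : Bool := decide (P.1 > Q.2.1);
           let d3 := Q.2.2.2.insert (i, j) s;
           if s then (Q.1, P.2.1, P.2.2.1 + Q.2.2.1 + 1, d3)
           else (P.1, Q.2.1, P.2.2.1 + Q.2.2.1, d3)) := by
        simp only [planBgo]
        rw [if_neg h1, if_neg hle, ← hm]
      rw [hpl, hcs]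
      simp only [checker, L1, R2]
      by_cases hgt : (checker_sort ((arr.drop i).take (m - i))).1.headD 0 >
          (checker_sort ((arr.drop m).take (j - m))).1.getLastD 0
      · simp only [hgt, decide_true, if_true]
        refine ⟨by rw [R1]; exact (headD_append hRne).symm, by rw [L2]; exact (getLastD_append hLne).symm, by rw [L3, R3], ?_, ?_⟩
        · intro p hp
          rw [PySem.Dict.getD_insert]
          rw [if_neg (by rintro rfl; exact hp ⟨le_rfl, le_rfl, hij⟩)]
          rw [R4 p (by rintro ⟨ha, hb, hc⟩; exact hp ⟨by omega, hb, hc⟩)]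
          exact L4 p (by rintro ⟨ha, hb, hc⟩; exact hp ⟨ha, by omega, hc⟩)
        · intro dd out hdd
          simp only [buildBgo]
          rw [if_neg h1, if_neg hle, ← hm]
          have hq : dd.getD (i, j) false = true := by
            rw [hdd (i, j) le_rfl le_rfl hij, PySem.Dict.getD_insert, if_pos rfl]
          rw [if_pos hq]
          rw [R5 dd out (by
            intro p ha hb hc
            rw [hdd p (by omega) hb hc, PySem.Dict.getD_insert]
            rw [if_neg (by rintro rfl; omega)])]
          rw [L5 dd (out ++ (checker_sort ((arr.drop m).take (j - m))).1) (by
            intro p ha hb hc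
            rw [hdd p ha (by omega) hc, PySem.Dict.getD_insert]
            rw [if_neg (by rintro rfl; omega)]
            exact R4 p (by rintro ⟨ha2, hb2, hc2⟩; omega))]
          rw [List.append_assoc]
      · simp only [hgt, decide_false, if_false, Bool.false_eq_true]
        refine ⟨(headD_append hLne).symm, (getLastD_append hRne).symm, by rw [L3, R3]; omega, ?_, ?_⟩
        · intro p hp
          rw [PySem.Dict.getD_insert]
          rw [if_neg (by rintro rfl; exact hp ⟨le_rfl, le_rfl, hij⟩)]
          rw [R4 p (by rintro ⟨ha, hb, hc⟩; exact hp ⟨by omega, hb, hc⟩)]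
          exact L4 p (by rintro ⟨ha, hb, hc⟩; exact hp ⟨ha, by omega, hc⟩)
        · intro dd out hdd
          simp only [buildBgo]
          rw [if_neg h1, if_neg hle, ← hm]
          have hq : dd.getD (i, j) false = false := by
            rw [hdd (i, j) le_rfl le_rfl hij, PySem.Dict.getD_insert, if_pos rfl]
          rw [if_neg (by rw [hq]; exact Bool.false_ne_true)]
          rw [L5 dd out (by
            intro p ha hb hc
            rw [hdd p ha (by omega) hc, PySem.Dict.getD_insert]
            rw [if_neg (by rintro rfl; omega)]
            exact R4 p (by rintro ⟨ha2, hb2, hc2⟩; omega))]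
          rw [R5 dd (out ++ (checker_sort ((arr.drop i).take (m - i))).1) (by
            intro p ha hb hc
            rw [hdd p (by omega) hb hc, PySem.Dict.getD_insert]
            rw [if_neg (by rintro rfl; omega)])]
          rw [List.append_assoc]

theorem checker_sort_spec_main (arr : List Int) (hne : arr ≠ []) :
    checker_sort arr = checker_sort_alt arr := by
  by_cases h1 : arr.length = 1
  · unfold checker_sort_alt
    simp [h1, checker_sort, csAgo]
  · have h0 : arr.length ≠ 0 := by simpa using hne
    have hlen : 2 ≤ arr.length := by omega
    unfold checker_sort_alt
    rw [if_neg h1]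
    show checker_sort arr =
      (buildBgo arr (planBgo arr arr.length 0 arr.length PySem.Dict.empty).2.2.2 arr.length 0 arr.length [],
       (planBgo arr arr.length 0 arr.length PySem.Dict.empty).2.2.1)
    obtain ⟨-, -, C3, -, C5⟩ :=
      plan_build arr.length arr 0 arr.length PySem.Dict.empty (by omega) (by omega) le_rfl
    simp only [List.drop_zero, Nat.sub_zero, List.take_length] at C3 C5
    have hb := C5 (planBgo arr arr.length 0 arr.length PySem.Dict.empty).2.2.2 [] (fun p _ _ _ => rfl)
    rw [hb, C3, List.nil_append]

-- ===== VERDICT (by name: the statement is the Claim_ definition above) =====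
theorem checker_sort_spec : Claim_equal_checker_sort := by
  intro arr _ hne
  unfold Spec_checker_sort
  exact checker_sort_spec_main arr hne
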